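-- pv_equiv track=rewrite | github.com/gother111/proofound-platform | scripts/generate-20k-l4-skills-final.py | generate_methods_skills
-- ===== SOURCE A (Python) =====
-- def generate_methods_skills(target=2000):
--     """M: Methods & Practices - ~2,000 skills"""
--     skills = []
--
--     # Agile Methodologies (500 skills)
--     agile_frameworks = ["Scrum", "Kanban", "SAFe", "LeSS", "Nexus", "XP", "Crystal"]
--     agile_practices = [
--         "Sprint Planning", "Daily Standup", "Sprint Review", "Retrospective",
--         "Backlog Refinement", "User Stories", "Story Points", "Velocity",
--         "Burn-down Charts", "Burn-up Charts", "Definition of Done",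
--         "Definition of Ready", "Continuous Integration", "Continuous Deployment",
--         "Pair Programming", "Test-Driven Development", "Behavior-Driven Development"
--     ]
--
--     for framework in agile_frameworks:
--         for practice in agile_practices:
--             for level in ["Basic", "Intermediate", "Advanced", "Expert"]:
--                 if len(skills) >= target * 0.25:
--                     break
--                 skills.append({"name": f"{framework} - {practice} ({level})",
--                               "category": "Agile & Lean",
--                               "subcategory": "Agile Frameworks"})
--
--     # Design Methods (400 skills)
--     design_methods = [
--         "Design Thinking", "Human-Centered Design", "Service Design",
--         "User Research", "Usability Testing", "A/B Testing",
--         "Persona Development", "Journey Mapping", "Empathy Mapping",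
--         "Wireframing", "Prototyping", "Design Systems", "Design Sprints"
--     ]
--
--     for method in design_methods:
--         for i in range(30):
--             if len(skills) >= target * 0.45:
--                 break
--             skills.append({"name": f"{method} - Application {i+1}",
--                           "category": "Design Methodology",
--                           "subcategory": "UX/UI Methods"})
--
--     # Quality & Process Improvement (600 skills)
--     quality_methods = [
--         "Six Sigma", "Lean Manufacturing", "Kaizen", "5S",
--         "Total Quality Management", "ISO 9001", "CMMI",
--         "Statistical Process Control", "Control Charts", "Pareto Analysis",
--         "Cause and Effect Analysis", "FMEA", "Root Cause Analysis"
--     ]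
--
--     for method in quality_methods:
--         for level in ["Green Belt", "Black Belt", "Master Black Belt", "Champion"]:
--             for i in range(10):
--                 if len(skills) >= target * 0.75:
--                     break
--                 skills.append({"name": f"{method} - {level} Skill {i+1}",
--                               "category": "Quality Management",
--                               "subcategory": "Process Improvement"})
--
--     # Research Methods (500 skills)
--     research_methods = [
--         "Qualitative Research", "Quantitative Research", "Mixed Methods",
--         "Ethnography", "Case Studies", "Surveys", "Interviews",
--         "Focus Groups", "Observation", "Content Analysis",
--         "Statistical Analysis", "Literature Review", "Meta-Analysis"
--     ]
--
--     while len(skills) < target: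
--         for method in research_methods:
--             for i in range(40):
--                 if len(skills) >= target:
--                     break
--                 skills.append({"name": f"{method} - Approach {i+1}",
--                               "category": "Research Methods",
--                               "subcategory": "Academic & Applied Research"})
--
--     return skills[:target]
-- ===== SOURCE B (Python) =====
-- def generate_methods_skills(target=2000):
--     """M: Methods & Practices - build each section's full item list, then
--     truncate by remaining capacity (cap = ceil(target*fraction))."""
--
--     def item(name, category, subcategory):
--         return {"name": name, "category": category, "subcategory": subcategory}
--
--     agile_frameworks = ["Scrum", "Kanban", "SAFe", "LeSS", "Nexus", "XP", "Crystal"]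
--     agile_practices = [
--         "Sprint Planning", "Daily Standup", "Sprint Review", "Retrospective",
--         "Backlog Refinement", "User Stories", "Story Points", "Velocity",
--         "Burn-down Charts", "Burn-up Charts", "Definition of Done",
--         "Definition of Ready", "Continuous Integration", "Continuous Deployment",
--         "Pair Programming", "Test-Driven Development", "Behavior-Driven Development"
--     ]
--     design_methods = [
--         "Design Thinking", "Human-Centered Design", "Service Design",
--         "User Research", "Usability Testing", "A/B Testing",
--         "Persona Development", "Journey Mapping", "Empathy Mapping",
--         "Wireframing", "Prototyping", "Design Systems", "Design Sprints"
--     ]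
--     quality_methods = [
--         "Six Sigma", "Lean Manufacturing", "Kaizen", "5S",
--         "Total Quality Management", "ISO 9001", "CMMI",
--         "Statistical Process Control", "Control Charts", "Pareto Analysis",
--         "Cause and Effect Analysis", "FMEA", "Root Cause Analysis"
--     ]
--     research_methods = [
--         "Qualitative Research", "Quantitative Research", "Mixed Methods",
--         "Ethnography", "Case Studies", "Surveys", "Interviews",
--         "Focus Groups", "Observation", "Content Analysis",
--         "Statistical Analysis", "Literature Review", "Meta-Analysis"
--     ]
--
--     agile_items = [item(f"{fw} - {pr} ({lv})", "Agile & Lean", "Agile Frameworks")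
--                    for fw in agile_frameworks
--                    for pr in agile_practices
--                    for lv in ["Basic", "Intermediate", "Advanced", "Expert"]]
--     design_items = [item(f"{m} - Application {i + 1}", "Design Methodology", "UX/UI Methods")
--                     for m in design_methods for i in range(30)]
--     quality_items = [item(f"{m} - {lv} Skill {i + 1}", "Quality Management", "Process Improvement")
--                      for m in quality_methods
--                      for lv in ["Green Belt", "Black Belt", "Master Black Belt", "Champion"]
--                      for i in range(10)]
--     research_items = [item(f"{m} - Approach {i + 1}", "Research Methods",
--                            "Academic & Applied Research")
--                       for m in research_methods for i in range(40)]
--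
--     def ceil_frac(p, q):
--         return -((-p) // q)
--
--     skills = []
--     for items, num, den in ((agile_items, 1, 4), (design_items, 9, 20), (quality_items, 3, 4)):
--         n = ceil_frac(target * num, den) - len(skills)
--         if n > 0:
--             skills += items[:n]
--     n = target - len(skills)
--     if n > 0:
--         reps = ceil_frac(n, len(research_items))
--         skills += (research_items * reps)[:n]
--     return skills
-- ===== Notes on version B (the rewrite author's own statement) =====
-- stated objective: alternative
-- what changed: Replaces A's guard-and-break nested loops (and the re-scanning while loop) by building each section's full item list once and truncating it by an arithmetic remaining-capacity ceil(target*fraction) computation, repeating the research list enough times before a single slice.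
import Mathlib
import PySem

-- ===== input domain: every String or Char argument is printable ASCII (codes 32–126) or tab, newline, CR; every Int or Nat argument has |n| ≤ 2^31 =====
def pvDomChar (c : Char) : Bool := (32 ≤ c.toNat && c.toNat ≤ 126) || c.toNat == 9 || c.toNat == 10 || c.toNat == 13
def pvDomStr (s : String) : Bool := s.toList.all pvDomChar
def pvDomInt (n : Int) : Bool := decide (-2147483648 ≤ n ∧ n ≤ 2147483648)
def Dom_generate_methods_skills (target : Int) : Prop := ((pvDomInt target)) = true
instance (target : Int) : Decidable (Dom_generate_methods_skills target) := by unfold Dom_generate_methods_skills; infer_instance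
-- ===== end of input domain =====

-- B replaces A's guard-and-break nested loops by building each section's full item list and
-- truncating it with an arithmetic remaining-capacity (ceiling) computation (objective: alternative).
-- Float thresholds `target*0.25/0.45/0.75` are ported as the equivalent exact integer comparisons
-- 4*len ≥ t, 20*len ≥ 9*t, 4*len ≥ 3*t; this is exact for |target| ≤ 2^31 (the Dom bound): each
-- float product is then close enough to the rational value that the int-vs-float comparison agrees.

-- shared literal data (the same string literals appear in both Pythons)
def agile_frameworks : List String := ["Scrum", "Kanban", "SAFe", "LeSS", "Nexus", "XP", "Crystal"]
def agile_practices : List String :=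
  ["Sprint Planning", "Daily Standup", "Sprint Review", "Retrospective",
   "Backlog Refinement", "User Stories", "Story Points", "Velocity",
   "Burn-down Charts", "Burn-up Charts", "Definition of Done",
   "Definition of Ready", "Continuous Integration", "Continuous Deployment",
   "Pair Programming", "Test-Driven Development", "Behavior-Driven Development"]
def agile_levels : List String := ["Basic", "Intermediate", "Advanced", "Expert"]
def design_methods : List String :=
  ["Design Thinking", "Human-Centered Design", "Service Design",
   "User Research", "Usability Testing", "A/B Testing",
   "Persona Development", "Journey Mapping", "Empathy Mapping",
   "Wireframing", "Prototyping", "Design Systems", "Design Sprints"]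
def quality_methods : List String :=
  ["Six Sigma", "Lean Manufacturing", "Kaizen", "5S",
   "Total Quality Management", "ISO 9001", "CMMI",
   "Statistical Process Control", "Control Charts", "Pareto Analysis",
   "Cause and Effect Analysis", "FMEA", "Root Cause Analysis"]
def quality_levels : List String := ["Green Belt", "Black Belt", "Master Black Belt", "Champion"]
def research_methods : List String :=
  ["Qualitative Research", "Quantitative Research", "Mixed Methods",
   "Ethnography", "Case Studies", "Surveys", "Interviews",
   "Focus Groups", "Observation", "Content Analysis",
   "Statistical Analysis", "Literature Review", "Meta-Analysis"]

-- ===== PORT A =====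
-- inner `for level in [...]` with its break (condition `len >= target*0.25` ported exactly as 4*len ≥ target)
def a1_levels (target : Int) (fw pr : String) : List String → List (List (String × String)) → List (List (String × String))
  | [], sk => sk
  | lv :: rest, sk =>
    if 4 * (sk.length : Int) ≥ target then sk
    else a1_levels target fw pr rest
      (sk ++ [[("name", fw ++ " - " ++ pr ++ " (" ++ lv ++ ")"),
               ("category", "Agile & Lean"), ("subcategory", "Agile Frameworks")]])

def a1_practices (target : Int) (fw : String) : List String → List (List (String × String)) → List (List (String × String))
  | [], sk => sk
  | pr :: rest, sk => a1_practices target fw rest (a1_levels target fw pr agile_levels sk)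

def a1_frameworks (target : Int) : List String → List (List (String × String)) → List (List (String × String))
  | [], sk => sk
  | fw :: rest, sk => a1_frameworks target rest (a1_practices target fw agile_practices sk)

-- `for i in range(30)` with break (condition `len >= target*0.45` ported exactly as 20*len ≥ 9*target)
def a2_inner (target : Int) (m : String) : List Int → List (List (String × String)) → List (List (String × String))
  | [], sk => sk
  | i :: rest, sk =>
    if 20 * (sk.length : Int) ≥ 9 * target then sk
    else a2_inner target m rest
      (sk ++ [[("name", m ++ " - Application " ++ PySem.Int.toStr (i + 1)),
               ("category", "Design Methodology"), ("subcategory", "UX/UI Methods")]])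

def a2_methods (target : Int) : List String → List (List (String × String)) → List (List (String × String))
  | [], sk => sk
  | m :: rest, sk => a2_methods target rest (a2_inner target m (PySem.List.pyRange 0 30 1) sk)

-- `for i in range(10)` with break (condition `len >= target*0.75` ported exactly as 4*len ≥ 3*target)
def a3_inner (target : Int) (m lv : String) : List Int → List (List (String × String)) → List (List (String × String))
  | [], sk => sk
  | i :: rest, sk =>
    if 4 * (sk.length : Int) ≥ 3 * target then sk
    else a3_inner target m lv rest
      (sk ++ [[("name", m ++ " - " ++ lv ++ " Skill " ++ PySem.Int.toStr (i + 1)),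
               ("category", "Quality Management"), ("subcategory", "Process Improvement")]])

def a3_levels (target : Int) (m : String) : List String → List (List (String × String)) → List (List (String × String))
  | [], sk => sk
  | lv :: rest, sk => a3_levels target m rest (a3_inner target m lv (PySem.List.pyRange 0 10 1) sk)

def a3_methods (target : Int) : List String → List (List (String × String)) → List (List (String × String))
  | [], sk => sk
  | m :: rest, sk => a3_methods target rest (a3_levels target m quality_levels sk)

-- `for i in range(40)` with break (condition `len >= target`)
def a4_inner (target : Int) (m : String) : List Int → List (List (String × String)) → List (List (String × String))
  | [], sk => sk
  | i :: rest, sk =>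
    if (sk.length : Int) ≥ target then sk
    else a4_inner target m rest
      (sk ++ [[("name", m ++ " - Approach " ++ PySem.Int.toStr (i + 1)),
               ("category", "Research Methods"), ("subcategory", "Academic & Applied Research")]])

def a4_methods (target : Int) : List String → List (List (String × String)) → List (List (String × String))
  | [], sk => sk
  | m :: rest, sk => a4_methods target rest (a4_inner target m (PySem.List.pyRange 0 40 1) sk)

-- length monotonicity / progress lemmas needed for the termination of the `while` loop
theorem a4_inner_len_le (target : Int) (m : String) :
    ∀ (is : List Int) (sk : List (List (String × String))),
      sk.length ≤ (a4_inner target m is sk).length := by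
  intro is
  induction is with
  | nil => intro sk; simp [a4_inner]
  | cons i rest ih =>
    intro sk
    rw [a4_inner]
    split
    · exact le_rfl
    · exact le_trans (by simp) (ih (sk ++ [_]))

theorem a4_methods_len_le (target : Int) :
    ∀ (ms : List String) (sk : List (List (String × String))),
      sk.length ≤ (a4_methods target ms sk).length := by
  intro ms
  induction ms with
  | nil => intro sk; simp [a4_methods]
  | cons m rest ih =>
    intro sk
    rw [a4_methods]
    exact le_trans (a4_inner_len_le target m _ sk) (ih _)

theorem a4_methods_progress (target : Int) (sk : List (List (String × String)))
    (h : (sk.length : Int) < target) :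
    sk.length < (a4_methods target research_methods sk).length := by
  rw [show research_methods = "Qualitative Research" :: research_methods.tail from rfl, a4_methods]
  refine lt_of_lt_of_le ?_ (a4_methods_len_le target _ _)
  rw [PySem.List.pyRange_one_cons (by norm_num), a4_inner]
  rw [if_neg (by omega)]
  refine lt_of_lt_of_le ?_ (a4_inner_len_le target _ _ _)
  simp

-- `while len(skills) < target:` — each pass runs the research `for` loops once
def a4_while (target : Int) (sk : List (List (String × String))) : List (List (String × String)) :=
  if h : (sk.length : Int) < target then
    a4_while target (a4_methods target research_methods sk)
  else sk
termination_by (target - sk.length).toNat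
decreasing_by
  have := a4_methods_progress target sk h
  omega

def generate_methods_skills (target : Int) : List (List (String × String)) :=
  let sk1 := a1_frameworks target agile_frameworks []
  let sk2 := a2_methods target design_methods sk1
  let sk3 := a3_methods target quality_methods sk2
  let sk4 := a4_while target sk3
  PySem.List.slice sk4 none (some target)   -- skills[:target]

-- ===== PORT B =====
def b_item (name category subcategory : String) : List (String × String) :=
  [("name", name), ("category", category), ("subcategory", subcategory)]

def agile_items : List (List (String × String)) :=
  agile_frameworks.flatMap fun fw => agile_practices.flatMap fun pr =>
    agile_levels.map fun lv =>
      b_item (fw ++ " - " ++ pr ++ " (" ++ lv ++ ")") "Agile & Lean" "Agile Frameworks"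

def design_items : List (List (String × String)) :=
  design_methods.flatMap fun m => (PySem.List.pyRange 0 30 1).map fun i =>
    b_item (m ++ " - Application " ++ PySem.Int.toStr (i + 1)) "Design Methodology" "UX/UI Methods"

def quality_items : List (List (String × String)) :=
  quality_methods.flatMap fun m => quality_levels.flatMap fun lv =>
    (PySem.List.pyRange 0 10 1).map fun i =>
      b_item (m ++ " - " ++ lv ++ " Skill " ++ PySem.Int.toStr (i + 1)) "Quality Management" "Process Improvement"

def research_items : List (List (String × String)) :=
  research_methods.flatMap fun m => (PySem.List.pyRange 0 40 1).map fun i =>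
    b_item (m ++ " - Approach " ++ PySem.Int.toStr (i + 1)) "Research Methods" "Academic & Applied Research"

-- -((-p) // q)
def ceil_frac (p q : Int) : Int := -(PySem.Int.floordiv (-p) q)

-- one step of Source B's `for items, num, den in (...)` loop
def b_step (target : Int) (sk items : List (List (String × String))) (num den : Int) :
    List (List (String × String)) :=
  let n := ceil_frac (target * num) den - sk.length
  if 0 < n then sk ++ PySem.List.slice items none (some n) else sk

def generate_methods_skills_alt (target : Int) : List (List (String × String)) :=
  let sk := [(agile_items, ((1 : Int), (4 : Int))), (design_items, (9, 20)),
             (quality_items, (3, 4))].foldl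
    (fun sk t => b_step target sk t.1 t.2.1 t.2.2) []
  let n := target - (sk.length : Int)
  if 0 < n then
    -- research_items * reps, then [:n]; reps = ceil(n / len(research_items)) is positive here,
    -- so `.toNat` is faithful to Python's list-times-int
    sk ++ PySem.List.slice
      ((List.replicate (ceil_frac n (research_items.length : Int)).toNat research_items).flatten)
      none (some n)
  else sk

-- ===== PRECONDITION & SPEC =====
def Spec_generate_methods_skills (target : Int) (out : List (List (String × String))) : Prop := out = generate_methods_skills_alt target
instance (target : Int) (out : List (List (String × String))) : Decidable (Spec_generate_methods_skills target out) := by unfold Spec_generate_methods_skills; infer_instance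

-- ===== CLAIM (what is proved, stated in full; the proofs are below) =====
def Claim_equal_generate_methods_skills : Prop := ∀ (target : Int), Dom_generate_methods_skills target → Spec_generate_methods_skills target (generate_methods_skills target)

-- ===== LEMMAS AND PROOFS =====

theorem ceil_frac_le_iff (p q L : Int) (hq : 0 < q) : ceil_frac p q ≤ L ↔ p ≤ L * q := by
  unfold ceil_frac
  rw [neg_le, PySem.Int.le_floordiv_iff_mul_le hq]
  constructor <;> intro h <;> nlinarith

-- one guarded-append step of any of A's capped loops, in closed "take" form
theorem cap_step (c : Int) (x : List (String × String)) (sk rest : List (List (String × String)))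
    (h : ¬ c ≤ (sk.length : Int)) :
    sk ++ (x :: rest).take ((c - (sk.length : Int)).toNat)
      = (sk ++ [x]) ++ rest.take ((c - (((sk ++ [x]).length : Nat) : Int)).toNat) := by
  have h1 : (c - (sk.length : Int)).toNat = (c - (((sk ++ [x]).length : Nat) : Int)).toNat + 1 := by
    simp only [List.length_append, List.length_cons, List.length_nil]
    omega
  rw [h1, List.take_succ_cons, List.append_assoc, List.singleton_append]

-- composing two capped appends with the same cap
theorem cap_chain (c : Int) (sk xs ys : List (List (String × String))) :
    (sk ++ xs.take ((c - (sk.length : Int)).toNat))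
        ++ ys.take ((c - (((sk ++ xs.take ((c - (sk.length : Int)).toNat)).length : Nat) : Int)).toNat)
      = sk ++ (xs ++ ys).take ((c - (sk.length : Int)).toNat) := by
  rw [List.take_append, List.append_assoc]
  congr 2
  congr 1
  simp only [List.length_append, List.length_take]
  omega

theorem a1_levels_eq (target : Int) (fw pr : String) :
    ∀ (lvls : List String) (sk : List (List (String × String))),
      a1_levels target fw pr lvls sk
        = sk ++ (lvls.map fun lv =>
            b_item (fw ++ " - " ++ pr ++ " (" ++ lv ++ ")") "Agile & Lean" "Agile Frameworks").take
              ((ceil_frac (target * 1) 4 - (sk.length : Int)).toNat) := by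
  intro lvls
  induction lvls with
  | nil => intro sk; simp [a1_levels]
  | cons lv rest ih =>
    intro sk
    rw [a1_levels, List.map_cons]
    have hiff : ceil_frac (target * 1) 4 ≤ (sk.length : Int) ↔ 4 * (sk.length : Int) ≥ target := by
      rw [ceil_frac_le_iff _ _ _ (by norm_num)]; constructor <;> intro h <;> nlinarith
    by_cases h : 4 * (sk.length : Int) ≥ target
    · rw [if_pos h]
      have h0 : (ceil_frac (target * 1) 4 - (sk.length : Int)).toNat = 0 := by
        have := hiff.mpr h; omega
      rw [h0, List.take_zero, List.append_nil]
    · rw [if_neg h, ih, cap_step _ _ _ _ (fun hc => h (hiff.mp hc)), b_item]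

theorem a1_practices_eq (target : Int) (fw : String) :
    ∀ (prs : List String) (sk : List (List (String × String))),
      a1_practices target fw prs sk
        = sk ++ (prs.flatMap fun pr => agile_levels.map fun lv =>
            b_item (fw ++ " - " ++ pr ++ " (" ++ lv ++ ")") "Agile & Lean" "Agile Frameworks").take
              ((ceil_frac (target * 1) 4 - (sk.length : Int)).toNat) := by
  intro prs
  induction prs with
  | nil => intro sk; simp [a1_practices]
  | cons pr rest ih =>
    intro sk
    rw [a1_practices, a1_levels_eq, ih, List.flatMap_cons, cap_chain]

theorem a1_frameworks_eq (target : Int) :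
    ∀ (fws : List String) (sk : List (List (String × String))),
      a1_frameworks target fws sk
        = sk ++ (fws.flatMap fun fw => agile_practices.flatMap fun pr => agile_levels.map fun lv =>
            b_item (fw ++ " - " ++ pr ++ " (" ++ lv ++ ")") "Agile & Lean" "Agile Frameworks").take
              ((ceil_frac (target * 1) 4 - (sk.length : Int)).toNat) := by
  intro fws
  induction fws with
  | nil => intro sk; simp [a1_frameworks]
  | cons fw rest ih =>
    intro sk
    rw [a1_frameworks, a1_practices_eq, ih, List.flatMap_cons, cap_chain]

theorem a2_inner_eq (target : Int) (m : String) :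
    ∀ (is : List Int) (sk : List (List (String × String))),
      a2_inner target m is sk
        = sk ++ (is.map fun i =>
            b_item (m ++ " - Application " ++ PySem.Int.toStr (i + 1)) "Design Methodology" "UX/UI Methods").take
              ((ceil_frac (target * 9) 20 - (sk.length : Int)).toNat) := by
  intro is
  induction is with
  | nil => intro sk; simp [a2_inner]
  | cons i rest ih =>
    intro sk
    rw [a2_inner, List.map_cons]
    have hiff : ceil_frac (target * 9) 20 ≤ (sk.length : Int) ↔ 20 * (sk.length : Int) ≥ 9 * target := by
      rw [ceil_frac_le_iff _ _ _ (by norm_num)]; constructor <;> intro h <;> nlinarith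
    by_cases h : 20 * (sk.length : Int) ≥ 9 * target
    · rw [if_pos h]
      have h0 : (ceil_frac (target * 9) 20 - (sk.length : Int)).toNat = 0 := by
        have := hiff.mpr h; omega
      rw [h0, List.take_zero, List.append_nil]
    · rw [if_neg h, ih, cap_step _ _ _ _ (fun hc => h (hiff.mp hc)), b_item]

theorem a2_methods_eq (target : Int) :
    ∀ (ms : List String) (sk : List (List (String × String))),
      a2_methods target ms sk
        = sk ++ (ms.flatMap fun m => (PySem.List.pyRange 0 30 1).map fun i =>
            b_item (m ++ " - Application " ++ PySem.Int.toStr (i + 1)) "Design Methodology" "UX/UI Methods").take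
              ((ceil_frac (target * 9) 20 - (sk.length : Int)).toNat) := by
  intro ms
  induction ms with
  | nil => intro sk; simp [a2_methods]
  | cons m rest ih =>
    intro sk
    rw [a2_methods, a2_inner_eq, ih, List.flatMap_cons, cap_chain]

theorem a3_inner_eq (target : Int) (m lv : String) :
    ∀ (is : List Int) (sk : List (List (String × String))),
      a3_inner target m lv is sk
        = sk ++ (is.map fun i =>
            b_item (m ++ " - " ++ lv ++ " Skill " ++ PySem.Int.toStr (i + 1)) "Quality Management" "Process Improvement").take
              ((ceil_frac (target * 3) 4 - (sk.length : Int)).toNat) := by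
  intro is
  induction is with
  | nil => intro sk; simp [a3_inner]
  | cons i rest ih =>
    intro sk
    rw [a3_inner, List.map_cons]
    have hiff : ceil_frac (target * 3) 4 ≤ (sk.length : Int) ↔ 4 * (sk.length : Int) ≥ 3 * target := by
      rw [ceil_frac_le_iff _ _ _ (by norm_num)]; constructor <;> intro h <;> nlinarith
    by_cases h : 4 * (sk.length : Int) ≥ 3 * target
    · rw [if_pos h]
      have h0 : (ceil_frac (target * 3) 4 - (sk.length : Int)).toNat = 0 := by
        have := hiff.mpr h; omega
      rw [h0, List.take_zero, List.append_nil]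
    · rw [if_neg h, ih, cap_step _ _ _ _ (fun hc => h (hiff.mp hc)), b_item]

theorem a3_levels_eq (target : Int) (m : String) :
    ∀ (lvls : List String) (sk : List (List (String × String))),
      a3_levels target m lvls sk
        = sk ++ (lvls.flatMap fun lv => (PySem.List.pyRange 0 10 1).map fun i =>
            b_item (m ++ " - " ++ lv ++ " Skill " ++ PySem.Int.toStr (i + 1)) "Quality Management" "Process Improvement").take
              ((ceil_frac (target * 3) 4 - (sk.length : Int)).toNat) := by
  intro lvls
  induction lvls with
  | nil => intro sk; simp [a3_levels]
  | cons lv rest ih =>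
    intro sk
    rw [a3_levels, a3_inner_eq, ih, List.flatMap_cons, cap_chain]

theorem a3_methods_eq (target : Int) :
    ∀ (ms : List String) (sk : List (List (String × String))),
      a3_methods target ms sk
        = sk ++ (ms.flatMap fun m => quality_levels.flatMap fun lv => (PySem.List.pyRange 0 10 1).map fun i =>
            b_item (m ++ " - " ++ lv ++ " Skill " ++ PySem.Int.toStr (i + 1)) "Quality Management" "Process Improvement").take
              ((ceil_frac (target * 3) 4 - (sk.length : Int)).toNat) := by
  intro ms
  induction ms with
  | nil => intro sk; simp [a3_methods]
  | cons m rest ih =>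
    intro sk
    rw [a3_methods, a3_levels_eq, ih, List.flatMap_cons, cap_chain]

theorem a4_inner_eq (target : Int) (m : String) :
    ∀ (is : List Int) (sk : List (List (String × String))),
      a4_inner target m is sk
        = sk ++ (is.map fun i =>
            b_item (m ++ " - Approach " ++ PySem.Int.toStr (i + 1)) "Research Methods" "Academic & Applied Research").take
              ((target - (sk.length : Int)).toNat) := by
  intro is
  induction is with
  | nil => intro sk; simp [a4_inner]
  | cons i rest ih =>
    intro sk
    rw [a4_inner, List.map_cons]
    by_cases h : (sk.length : Int) ≥ target
    · rw [if_pos h]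
      have h0 : (target - (sk.length : Int)).toNat = 0 := by omega
      rw [h0, List.take_zero, List.append_nil]
    · rw [if_neg h, ih, cap_step _ _ _ _ (by omega), b_item]

theorem a4_methods_eq (target : Int) :
    ∀ (ms : List String) (sk : List (List (String × String))),
      a4_methods target ms sk
        = sk ++ (ms.flatMap fun m => (PySem.List.pyRange 0 40 1).map fun i =>
            b_item (m ++ " - Approach " ++ PySem.Int.toStr (i + 1)) "Research Methods" "Academic & Applied Research").take
              ((target - (sk.length : Int)).toNat) := by
  intro ms
  induction ms with
  | nil => intro sk; simp [a4_methods]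
  | cons m rest ih =>
    intro sk
    rw [a4_methods, a4_inner_eq, ih, List.flatMap_cons]
    have := cap_chain target sk
      ((PySem.List.pyRange 0 40 1).map fun i =>
        b_item (m ++ " - Approach " ++ PySem.Int.toStr (i + 1)) "Research Methods" "Academic & Applied Research")
      (rest.flatMap fun m => (PySem.List.pyRange 0 40 1).map fun i =>
        b_item (m ++ " - Approach " ++ PySem.Int.toStr (i + 1)) "Research Methods" "Academic & Applied Research")
    exact this

set_option maxRecDepth 8192 in
theorem research_items_length : research_items.length = 520 := by rfl

theorem a4_methods_research_eq (target : Int) (sk : List (List (String × String))) :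
    a4_methods target research_methods sk
      = sk ++ research_items.take ((target - (sk.length : Int)).toNat) := by
  rw [a4_methods_eq, research_items]

theorem a4_while_eq (target : Int) :
    ∀ (sk : List (List (String × String))),
      a4_while target sk
        = sk ++ ((List.replicate (ceil_frac (target - (sk.length : Int)) 520).toNat research_items).flatten).take
            ((target - (sk.length : Int)).toNat) := by
  intro sk
  rw [a4_while]
  by_cases h : (sk.length : Int) < target
  · rw [dif_pos h, a4_while_eq target (a4_methods target research_methods sk)]
    rw [a4_methods_research_eq]
    by_cases h520 : target - (sk.length : Int) ≤ 520
    · -- last pass: the remaining n ≤ 520 items come from one copy of research_items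
      have hn : (target - (sk.length : Int)).toNat ≤ 520 := by omega
      have hlen : ((sk ++ research_items.take ((target - (sk.length : Int)).toNat)).length : Int) = target := by
        simp only [List.length_append, List.length_take, research_items_length]
        omega
      have hc1 : (ceil_frac (target - (sk.length : Int)) 520).toNat = 1 := by
        have h0 : ¬ ceil_frac (target - (sk.length : Int)) 520 ≤ 0 := by
          rw [ceil_frac_le_iff _ _ _ (by norm_num)]; omega
        have h1 : ceil_frac (target - (sk.length : Int)) 520 ≤ 1 := by
          rw [ceil_frac_le_iff _ _ _ (by norm_num)]; omega
        omega
      have hz : (target - ((sk ++ research_items.take ((target - (sk.length : Int)).toNat)).length : Int)) = 0 := by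
        rw [hlen]; ring
      rw [hz, hc1]
      simp
    · -- n > 520: one full copy is appended, recurse with n - 520
      have htake : research_items.take ((target - (sk.length : Int)).toNat) = research_items := by
        apply List.take_of_length_le
        rw [research_items_length]; omega
      rw [htake]
      have hlen : ((sk ++ research_items).length : Int) = (sk.length : Int) + 520 := by
        simp [research_items_length]
      rw [hlen]
      have hceil : (ceil_frac (target - (sk.length : Int)) 520).toNat
          = (ceil_frac (target - ((sk.length : Int) + 520)) 520).toNat + 1 := by
        unfold ceil_frac
        rw [PySem.Int.floordiv_eq_ediv_of_pos (a := -(target - (sk.length : Int))) (by norm_num),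
            PySem.Int.floordiv_eq_ediv_of_pos (a := -(target - ((sk.length : Int) + 520))) (by norm_num)]
        omega
      rw [hceil, List.replicate_succ, List.flatten_cons, List.append_assoc]
      congr 1
      rw [List.take_append, research_items_length]
      have : research_items.take ((target - (sk.length : Int)).toNat) = research_items := by
        apply List.take_of_length_le
        rw [research_items_length]; omega
      rw [this, show (target - ((sk.length : Int) + 520)).toNat
            = (target - (sk.length : Int)).toNat - 520 from by omega]
  · rw [dif_neg h]
    have h0 : (ceil_frac (target - (sk.length : Int)) 520).toNat = 0 := by
      have : ceil_frac (target - (sk.length : Int)) 520 ≤ 0 := by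
        rw [ceil_frac_le_iff _ _ _ (by norm_num)]; omega
      omega
    have h1 : (target - (sk.length : Int)).toNat = 0 := by omega
    simp [h0, h1]
termination_by sk => (target - sk.length).toNat
decreasing_by
  have := a4_methods_progress target sk h
  omega

-- B's three-step fold, unfolded and rewritten into the same unconditional "take" shape
theorem b_step_eq (target : Int) (sk items : List (List (String × String))) (num den : Int) :
    b_step target sk items num den
      = sk ++ items.take ((ceil_frac (target * num) den - (sk.length : Int)).toNat) := by
  simp only [b_step]
  by_cases h : 0 < ceil_frac (target * num) den - (sk.length : Int)
  · rw [if_pos h, PySem.List.slice_to _ h.le]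
  · rw [if_neg h]
    have h0 : (ceil_frac (target * num) den - (sk.length : Int)).toNat = 0 := by omega
    rw [h0, List.take_zero, List.append_nil]

-- every section cap is at most max(target,0) (so the final python slice skills[:target] is the identity)
theorem caps_chain_le (t : Int) :
    ceil_frac (t * 1) 4 ≤ max t 0
      ∧ ceil_frac (t * 9) 20 ≤ max t 0
      ∧ ceil_frac (t * 3) 4 ≤ max t 0 := by
  unfold ceil_frac
  rw [PySem.Int.floordiv_eq_ediv_of_pos (a := -(t * 1)) (by norm_num),
      PySem.Int.floordiv_eq_ediv_of_pos (a := -(t * 9)) (by norm_num),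
      PySem.Int.floordiv_eq_ediv_of_pos (a := -(t * 3)) (by norm_num)]
  omega

theorem len_cap (c : Int) (sk xs : List (List (String × String))) :
    (((sk ++ xs.take ((c - (sk.length : Int)).toNat)).length : Nat) : Int)
      ≤ max c (sk.length : Int) := by
  rw [List.length_append, List.length_take]
  push_cast
  omega

theorem slice_nil_to (t : Int) :
    PySem.List.slice ([] : List (List (String × String))) none (some t) = [] := by
  simp [PySem.List.slice]

-- the research section: A's while-loop closed form vs B's replicate-and-slice step,
-- including the final (identity) `skills[:target]` slice of A
theorem final_glue (t : Int) (sk : List (List (String × String)))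
    (h : (sk.length : Int) ≤ max t 0) :
    PySem.List.slice
        (sk ++ ((List.replicate (ceil_frac (t - (sk.length : Int)) 520).toNat research_items).flatten).take
            ((t - (sk.length : Int)).toNat))
        none (some t)
      = if 0 < t - (sk.length : Int) then
          sk ++ PySem.List.slice
            ((List.replicate (ceil_frac (t - (sk.length : Int)) ((research_items.length : Nat) : Int)).toNat research_items).flatten)
            none (some (t - (sk.length : Int)))
        else sk := by
  have hR : ((research_items.length : Nat) : Int) = 520 := by
    rw [research_items_length]; simp
  rw [hR]
  by_cases hpos : 0 < t - (sk.length : Int)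
  · rw [if_pos hpos]
    have ht : (0 : Int) ≤ t := by omega
    rw [PySem.List.slice_to _ ht, PySem.List.slice_to _ hpos.le, List.take_append]
    have h1 : List.take t.toNat sk = sk := List.take_of_length_le (by omega)
    have h2 : (((List.replicate (ceil_frac (t - (sk.length : Int)) 520).toNat research_items).flatten).take
        ((t - (sk.length : Int)).toNat)).length ≤ t.toNat - sk.length := by
      rw [List.length_take]; omega
    rw [h1, List.take_of_length_le h2]
  · rw [if_neg hpos]
    have hm : (ceil_frac (t - (sk.length : Int)) 520).toNat = 0 := by
      have := (ceil_frac_le_iff (t - (sk.length : Int)) 520 0 (by norm_num)).mpr (by omega)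
      omega
    have hnn : (t - (sk.length : Int)).toNat = 0 := by omega
    rw [hm, hnn, List.take_zero, List.append_nil]
    by_cases ht : 0 ≤ t
    · rw [PySem.List.slice_to _ ht]
      exact List.take_of_length_le (by omega)
    · have hsk : sk = [] := by
        have : sk.length = 0 := by omega
        exact List.eq_nil_of_length_eq_zero this
      rw [hsk, slice_nil_to]

-- ===== VERDICT =====
theorem generate_methods_skills_spec : Claim_equal_generate_methods_skills := by
  intro target _
  unfold Spec_generate_methods_skills
  simp only [generate_methods_skills, generate_methods_skills_alt, List.foldl_cons, List.foldl_nil]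
  rw [b_step_eq, b_step_eq, b_step_eq]
  rw [agile_items, design_items, quality_items]
  rw [a1_frameworks_eq, a2_methods_eq, a3_methods_eq, a4_while_eq]
  apply final_glue
  obtain ⟨hc1, hc2, hc3⟩ := caps_chain_le target
  simp only [List.length_nil, Nat.cast_zero]
  refine le_trans (len_cap _ _ _) (max_le (by omega) ?_)
  refine le_trans (len_cap _ _ _) (max_le (by omega) ?_)
  refine le_trans (len_cap _ _ _) (max_le (by omega)
    (by simp only [List.length_nil, Nat.cast_zero]; omega))
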